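-- pv_equiv track=rewrite | github.com/BrettRey/erdos-problem-993 | check_1priv_vs_half.py | parse_graph6
-- ===== SOURCE A (Python) =====
-- def parse_graph6(s):
--     s = s.strip()
--     if not s:
--         return 0, []
--     idx = 0
--     if ord(s[0]) - 63 < 63:
--         n = ord(s[0]) - 63; idx = 1
--     else:
--         idx = 1; n = 0
--         for _ in range(3):
--             n = n * 64 + (ord(s[idx]) - 63); idx += 1
--     adj = [[] for _ in range(n)]
--     bits = []
--     for c in s[idx:]:
--         val = ord(c) - 63
--         for b in range(5, -1, -1):
--             bits.append((val >> b) & 1)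
--     bit_idx = 0
--     for j in range(n):
--         for i in range(j):
--             if bit_idx < len(bits) and bits[bit_idx]:
--                 adj[i].append(j); adj[j].append(i)
--             bit_idx += 1
--     return n, adj
-- ===== SOURCE B (Python) =====
-- def parse_graph6(s):
--     s = s.strip()
--     if not s:
--         return 0, []
--     if ord(s[0]) - 63 < 63:
--         n = ord(s[0]) - 63
--         data = s[1:]
--     else:
--         n = (ord(s[1]) - 63) * 4096 + (ord(s[2]) - 63) * 64 + (ord(s[3]) - 63)
--         data = s[4:]
--
--     def bit(i, j):
--         # bit of pair (i, j), i < j, at upper-triangle index j*(j-1)//2 + i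
--         k = j * (j - 1) // 2 + i
--         return k < 6 * len(data) and ((ord(data[k // 6]) - 63) >> (5 - k % 6)) & 1
--
--     adj = [[v for v in range(u) if bit(v, u)]
--            + [v for v in range(u + 1, n) if bit(u, v)]
--            for u in range(n)]
--     return n, adj
-- ===== Notes on version B (the rewrite author's own statement) =====
-- stated objective: faster
-- what changed: A materialises the full bit list of all data characters and builds the adjacency by mutating rows while scanning all pairs with a running bit counter; B never builds a bit list or mutates anything: it computes the bit of any pair (i,j) on demand from the data character at closed-form index j*(j-1)//2+i and constructs each adjacency row independently as a filtered comprehension, so it reads only the characters the n(n-1)/2 pairs need.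
-- outside the precondition, e.g. on parse_graph6('~A'): A raises IndexError, B raises IndexError
import Mathlib
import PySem

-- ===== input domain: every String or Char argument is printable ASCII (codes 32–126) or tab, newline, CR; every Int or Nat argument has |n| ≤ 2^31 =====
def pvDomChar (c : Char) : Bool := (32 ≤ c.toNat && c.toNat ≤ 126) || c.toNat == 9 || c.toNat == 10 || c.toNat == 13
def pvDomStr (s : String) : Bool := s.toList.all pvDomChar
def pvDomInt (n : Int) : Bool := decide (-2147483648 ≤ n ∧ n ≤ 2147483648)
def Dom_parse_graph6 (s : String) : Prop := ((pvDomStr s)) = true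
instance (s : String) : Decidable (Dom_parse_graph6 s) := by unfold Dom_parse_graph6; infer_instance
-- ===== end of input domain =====

-- B drops A's materialised bit list and its mutating pair scan: it reads the bit of a pair
-- (i, j) directly from the data character at closed-form index j*(j-1)//2 + i and builds each
-- adjacency row independently as a filtered comprehension, touching only the characters the
-- n(n-1)/2 pairs need (objective: faster — a timing run measures it; no intermediate bit
-- list, no mutation).

-- ===== PORT A =====
def pgAVal (c : Char) : Int := (c.toNat : Int) - 63

-- (val >> b) & 1 : Python's arithmetic right shift is Lean's >>>, '&' is PySem.Int.band
def pgABit (v : Int) (b : Nat) : Int := PySem.Int.band (v >>> b) 1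

-- the header: short form n = ord(c)-63, idx = 1; else n from s[1],s[2],s[3], idx = 4
-- (the getD default is only reached outside Pre_, where Python raises IndexError)
def pgAHeader (t : List Char) (c : Char) : Int × Nat :=
  if pgAVal c < 63 then (pgAVal c, 1)
  else (([1, 2, 3] : List Nat).foldl (fun n i => n * 64 + pgAVal (t.getD i '?')) 0, 4)

-- adj[u].append(v)  (u is a valid nonnegative index whenever it is used)
def pgAAppend (adj : List (List Int)) (u v : Int) : List (List Int) :=
  adj.modify u.toNat (fun row => row ++ [v])

-- adj[i].append(j); adj[j].append(i)
def pgAAdd (adj : List (List Int)) (p : Int × Int) : List (List Int) :=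
  pgAAppend (pgAAppend adj p.1 p.2) p.2 p.1

-- A's inner-loop body: if bit_idx < len(bits) and bits[bit_idx]: add edge; bit_idx += 1
def pgAStep (bits : List Int) (st : List (List Int) × Int) (p : Int × Int) :
    List (List Int) × Int :=
  (if st.2 < (bits.length : Int) ∧ (PySem.List.pyGet? bits st.2).getD 0 ≠ 0
     then pgAAdd st.1 p else st.1, st.2 + 1)

def parse_graph6 (s : String) : Int × List (List Int) :=
  let t := PySem.Chars.strip s.toList
  match t with
  | [] => (0, [])
  | c :: _ =>
    let h := pgAHeader t c
    let n := h.1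
    let idx := h.2
    let adj : List (List Int) := (PySem.List.pyRange 0 n 1).map (fun _ => ([] : List Int))
    let bits : List Int :=
      (t.drop idx).flatMap (fun ch => ([5, 4, 3, 2, 1, 0] : List Nat).map (pgABit (pgAVal ch)))
    let res := (PySem.List.pyRange 0 n 1).foldl (fun st j =>
        (PySem.List.pyRange 0 j 1).foldl (fun st i => pgAStep bits st (i, j)) st)
      (adj, (0 : Int))
    (n, res.1)

-- ===== PORT B =====
-- bit(i, j): the bit of pair (i, j) (i < j), read straight from the data character holding
-- upper-triangle index k = j*(j-1)//2 + i; False when k runs past the data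
-- (data[k//6] via getD: the guard k < 6*len(data) makes the index valid whenever it is read)
def pgBBit (data : List Char) (i j : Int) : Bool :=
  let k := PySem.Int.floordiv (j * (j - 1)) 2 + i
  decide (k < 6 * (data.length : Int)) &&
    decide (PySem.Int.band
      ((((data.getD (PySem.Int.floordiv k 6).toNat '?').toNat : Int) - 63) >>>
        (5 - PySem.Int.mod k 6).toNat) 1 ≠ 0)

def parse_graph6_alt (s : String) : Int × List (List Int) :=
  let t := PySem.Chars.strip s.toList
  if t.isEmpty then (0, [])
  else
    -- header (the getD defaults are only reached outside Pre_, where Python raises IndexError)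
    let hd :=
      if ((t.getD 0 '?').toNat : Int) - 63 < 63 then
        (((t.getD 0 '?').toNat : Int) - 63, t.drop 1)
      else
        ((((t.getD 1 '?').toNat : Int) - 63) * 4096 + (((t.getD 2 '?').toNat : Int) - 63) * 64 +
          (((t.getD 3 '?').toNat : Int) - 63), t.drop 4)
    let n := hd.1
    let data := hd.2
    (n, (PySem.List.pyRange 0 n 1).map (fun u =>
      (PySem.List.pyRange 0 u 1).filter (fun v => pgBBit data v u) ++
      (PySem.List.pyRange (u + 1) n 1).filter (fun v => pgBBit data u v)))

-- ===== PRECONDITION & SPEC =====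
-- Pre_ excludes exactly the strings whose stripped form starts with a long-form header
-- character ('~'-class, ord ≥ 126) but has fewer than 4 characters: there Python A raises
-- IndexError (and so does Python B).
def Pre_parse_graph6 (s : String) : Prop :=
  (PySem.Chars.strip s.toList).head?.all (fun c => pgAVal c < 63) = true ∨
  4 ≤ (PySem.Chars.strip s.toList).length
instance (s : String) : Decidable (Pre_parse_graph6 s) := by unfold Pre_parse_graph6; infer_instance

def pvWitness_parse_graph6 : String := "BW"

def Spec_parse_graph6 (s : String) (out : Int × List (List Int)) : Prop := out = parse_graph6_alt s
instance (s : String) (out : Int × List (List Int)) : Decidable (Spec_parse_graph6 s out) := by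
  unfold Spec_parse_graph6; infer_instance

-- ===== CLAIM (what is proved, stated in full; the proofs are below) =====
def Claim_equal_parse_graph6 : Prop :=
  ∀ (s : String), Dom_parse_graph6 s → Pre_parse_graph6 s → Spec_parse_graph6 s (parse_graph6 s)

-- ===== LEMMAS AND PROOFS =====

-- the bit A's counter sees at (nonnegative) index k, as a Bool (0 past the end of the list)
def gA (bits : List Int) (k : Int) : Bool := decide ((PySem.List.pyGet? bits k).getD 0 ≠ 0)

-- T j = j*(j-1)//2, the number of pairs before column j
def pgT (j : Int) : Int := PySem.Int.floordiv (j * (j - 1)) 2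

-- what processing pair p appends to row u
def contrib (u : Int) (p : Int × Int) : List Int :=
  (if p.1 = u then [p.2] else []) ++ (if p.2 = u then [p.1] else [])

-- everything appended to row u by the pairs L, the counter starting at c
def contribFrom (bits : List Int) (u : Int) : Int → List (Int × Int) → List Int
  | _, [] => []
  | c, p :: L => (if gA bits c then contrib u p else []) ++ contribFrom bits u (c + 1) L

-- the pairs of column j, in A's inner order
def colPairs (j : Int) : List (Int × Int) := (PySem.List.pyRange 0 j 1).map (fun i => (i, j))

theorem pgT_succ (j : Int) (_hj : 0 ≤ j) : pgT (j + 1) = pgT j + j := by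
  obtain ⟨k, hk⟩ := Int.even_mul_succ_self (j - 1)
  have hk' : j * (j - 1) = k + k := by rw [mul_comm]; simpa using hk
  have h2 : (j + 1) * (j + 1 - 1) = (k + j) + (k + j) := by linear_combination hk'
  unfold pgT
  rw [PySem.Int.floordiv_eq_ediv_of_pos (by norm_num), PySem.Int.floordiv_eq_ediv_of_pos (by norm_num),
    hk', h2]
  omega

theorem pgT_nonneg (j : Int) (hj : 0 ≤ j) : 0 ≤ pgT j := by
  have h : 0 ≤ j * (j - 1) := by
    rcases eq_or_lt_of_le hj with h | h
    · simp [← h]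
    · exact mul_nonneg (by omega) (by omega)
  unfold pgT
  rw [PySem.Int.floordiv_eq_ediv_of_pos (by norm_num)]
  omega

theorem length_pgAAdd (adj : List (List Int)) (p : Int × Int) :
    (pgAAdd adj p).length = adj.length := by
  simp [pgAAdd, pgAAppend]

theorem length_foldA (bits : List Int) (L : List (Int × Int)) :
    ∀ st : List (List Int) × Int, ((L.foldl (pgAStep bits) st).1).length = st.1.length := by
  induction L with
  | nil => intro st; rfl
  | cons p L ih =>
    intro st
    rw [List.foldl_cons, ih]
    simp only [pgAStep]
    split_ifs with h
    · exact length_pgAAdd _ _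
    · rfl

theorem row_pgAAdd (adj : List (List Int)) (p : Int × Int) (u : Int) (hu : 0 ≤ u)
    (h1 : 0 ≤ p.1) (h12 : p.1 < p.2) (h2 : p.2 < (adj.length : Int)) :
    (pgAAdd adj p).getD u.toNat [] = adj.getD u.toNat [] ++ contrib u p := by
  obtain ⟨i, j⟩ := p
  simp only at h1 h12 h2 ⊢
  unfold pgAAdd pgAAppend contrib
  simp only [List.getD_eq_getElem?_getD, List.getElem?_modify]
  by_cases hiu : i = u
  · have hju : j ≠ u := by omega
    have hjun : ¬ (j.toNat = u.toNat) := by omega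
    have hiun : i.toNat = u.toNat := by omega
    have hlt : u.toNat < adj.length := by omega
    simp [hiu, hju, hjun, List.getElem?_eq_getElem hlt]
  · by_cases hju : j = u
    · have hiun : ¬ (i.toNat = u.toNat) := by omega
      have hjun : j.toNat = u.toNat := by omega
      have hlt : u.toNat < adj.length := by omega
      simp [hiu, hju, hiun, List.getElem?_eq_getElem hlt]
    · have hiun : ¬ (i.toNat = u.toNat) := by omega
      have hjun : ¬ (j.toNat = u.toNat) := by omega
      simp [hiu, hju, hiun, hjun]

theorem rows_foldA (bits : List Int) (L : List (Int × Int)) :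
    ∀ (adj : List (List Int)) (c u : Int), 0 ≤ c → 0 ≤ u →
      (∀ p ∈ L, 0 ≤ p.1 ∧ p.1 < p.2 ∧ p.2 < (adj.length : Int)) →
      ((L.foldl (pgAStep bits) (adj, c)).1).getD u.toNat []
        = adj.getD u.toNat [] ++ contribFrom bits u c L := by
  induction L with
  | nil => intro adj c u _ _ _; simp [contribFrom]
  | cons p L ih =>
    intro adj c u hc hu hmem
    have hp := hmem p (by simp)
    have hcond : (c < (bits.length : Int) ∧ (PySem.List.pyGet? bits c).getD 0 ≠ 0) ↔ gA bits c = true := by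
      unfold gA
      by_cases hlen : c < (bits.length : Int)
      · have : ∃ x, PySem.List.pyGet? bits c = some x := by
          have := (PySem.List.pyGet?_eq_none_iff (xs := bits) (i := c))
          cases h : PySem.List.pyGet? bits c with
          | none => exact absurd ((this).mp h) (by unfold PySem.Raise.InRange; omega)
          | some x => exact ⟨x, rfl⟩
        obtain ⟨x, hx⟩ := this
        simp [hx, hlen]
      · have hnone : PySem.List.pyGet? bits c = none := by
          rw [PySem.List.pyGet?_eq_none_iff]
          unfold PySem.Raise.InRange; omega
        simp [hnone, hlen]
    rw [List.foldl_cons]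
    simp only [pgAStep, contribFrom]
    by_cases hg : gA bits c = true
    · rw [if_pos (hcond.mpr hg), if_pos hg]
      rw [ih (pgAAdd adj p) (c + 1) u (by omega) hu
        (fun q hq => by rw [length_pgAAdd]; exact hmem q (by simp [hq]))]
      rw [row_pgAAdd adj p u hu hp.1 hp.2.1 hp.2.2, List.append_assoc]
    · rw [if_neg (fun h => hg (hcond.mp h)), if_neg hg]
      rw [ih adj (c + 1) u (by omega) hu (fun q hq => hmem q (by simp [hq]))]
      simp

theorem contribFrom_append (bits : List Int) (u : Int) (L1 L2 : List (Int × Int)) :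
    ∀ (c : Int), contribFrom bits u c (L1 ++ L2)
      = contribFrom bits u c L1 ++ contribFrom bits u (c + (L1.length : Int)) L2 := by
  induction L1 with
  | nil => intro c; simp [contribFrom]
  | cons p L1 ih =>
    intro c
    simp only [List.cons_append, contribFrom, List.length_cons, ih (c + 1), List.append_assoc]
    have h : c + ((L1.length + 1 : Nat) : Int) = c + 1 + (L1.length : Int) := by push_cast; ring
    rw [h]

theorem contribFrom_none (bits : List Int) (u : Int) (L : List (Int × Int))
    (h : ∀ p ∈ L, p.1 ≠ u ∧ p.2 ≠ u) : ∀ (c : Int), contribFrom bits u c L = [] := by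
  induction L with
  | nil => intro c; rfl
  | cons p L ih =>
    intro c
    have hp := h p (by simp)
    simp only [contribFrom, contrib, if_neg hp.1, if_neg hp.2, List.append_nil]
    rw [ih (fun q hq => h q (List.mem_cons_of_mem _ hq)) (c + 1)]
    simp

-- the column j = u, entered at inner index a with counter c: picks up the set lower neighbours
theorem col_eq (bits : List Int) (u : Int) :
    ∀ (fuel : Nat) (a c : Int), (u - a).toNat = fuel →
      contribFrom bits u c ((PySem.List.pyRange a u 1).map (fun i => (i, u)))
        = (PySem.List.pyRange a u 1).filter (fun i => gA bits (c - a + i)) := by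
  intro fuel
  induction fuel with
  | zero =>
    intro a c hf
    rw [PySem.List.pyRange_one_eq_nil (by omega)]
    rfl
  | succ m ih =>
    intro a c hf
    have hau : a < u := by omega
    rw [PySem.List.pyRange_one_cons hau]
    simp only [List.map_cons, List.filter_cons, contribFrom]
    have hca : c - a + a = c := by ring
    have h1 : contribFrom bits u (c + 1) ((PySem.List.pyRange (a + 1) u 1).map (fun i => (i, u)))
        = (PySem.List.pyRange (a + 1) u 1).filter (fun i => gA bits (c - a + i)) := by
      rw [ih (a + 1) (c + 1) (by omega)]
      apply List.filter_congr
      intro x _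
      congr 1
      ring
    rw [h1, hca]
    have hcon : contrib u (a, u) = [a] := by
      unfold contrib
      rw [if_neg (by simp; omega), if_pos rfl]
      simp
    by_cases hg : gA bits c = true
    · simp [hg, hcon]
    · simp [hg]

-- a column j > u, entered at inner index a ≤ u with counter c: contributes [j] iff the bit
-- at the position of pair (u, j) is set
theorem col_gt (bits : List Int) (u j : Int) (hj : u < j) :
    ∀ (fuel : Nat) (a c : Int), (j - a).toNat = fuel → 0 ≤ a → a ≤ u →
      contribFrom bits u c ((PySem.List.pyRange a j 1).map (fun i => (i, j)))
        = if gA bits (c + (u - a)) then [j] else [] := by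
  intro fuel
  induction fuel with
  | zero => intro a c hf _ hau; omega
  | succ m ih =>
    intro a c hf ha hau
    have haj : a < j := by omega
    rw [PySem.List.pyRange_one_cons haj]
    simp only [List.map_cons, contribFrom]
    by_cases hae : a = u
    · subst hae
      have hcon : contrib a (a, j) = [j] := by
        unfold contrib
        rw [if_pos rfl, if_neg (by simp; omega)]
        simp
      have hrest : contribFrom bits a (c + 1) ((PySem.List.pyRange (a + 1) j 1).map (fun i => (i, j))) = [] := by
        apply contribFrom_none
        intro p hp
        simp only [List.mem_map] at hp
        obtain ⟨i, hi, rfl⟩ := hp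
        rw [PySem.List.mem_pyRange_one] at hi
        constructor <;> simp <;> omega
        
      rw [hrest, hcon]
      have : c + (a - a) = c := by ring
      rw [this]
      by_cases hg : gA bits c = true <;> simp [hg]
    · have hcon : contrib u (a, j) = [] := by
        unfold contrib
        rw [if_neg (by simp; omega), if_neg (by simp; omega)]
        simp
      rw [hcon, ih (a + 1) (c + 1) (by omega) (by omega) (by omega)]
      have : c + 1 + (u - (a + 1)) = c + (u - a) := by ring
      rw [this]
      simp

-- length of the pairs of columns [0, b): T b
theorem len_cols : ∀ (m : Nat),
    ((((PySem.List.pyRange 0 (m : Int) 1).flatMap colPairs)).length : Int) = pgT (m : Int) := by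
  intro m
  induction m with
  | zero =>
    rw [PySem.List.pyRange_one_eq_nil (by omega)]
    simp only [List.flatMap_nil, List.length_nil, Nat.cast_zero]
    decide
  | succ k ih =>
    have : ((k : Int) + 1) = ((k + 1 : Nat) : Int) := by push_cast; ring
    rw [← this, PySem.List.pyRange_one_succ_right (by omega), List.flatMap_append, List.length_append,
      pgT_succ _ (by omega)]
    push_cast
    rw [ih]
    simp only [List.flatMap_cons, List.flatMap_nil, List.append_nil, colPairs, List.length_map,
      PySem.List.length_pyRange_one]
    have h0 : (((k : Int) - 0).toNat : Int) = (k : Int) := by omega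
    rw [h0]

-- the columns [j₀, n) with j₀ > u, entered with counter T j₀: the set upper neighbours of u
theorem cols_gt (bits : List Int) (u : Int) (hu : 0 ≤ u) :
    ∀ (fuel : Nat) (j₀ n : Int), (n - j₀).toNat = fuel → u < j₀ →
      contribFrom bits u (pgT j₀) ((PySem.List.pyRange j₀ n 1).flatMap colPairs)
        = (PySem.List.pyRange j₀ n 1).filter (fun j => gA bits (pgT j + u)) := by
  intro fuel
  induction fuel with
  | zero =>
    intro j₀ n hf _
    rw [PySem.List.pyRange_one_eq_nil (by omega)]
    rfl
  | succ m ih =>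
    intro j₀ n hf hj₀
    have hjn : j₀ < n := by omega
    rw [PySem.List.pyRange_one_cons hjn, List.flatMap_cons, List.filter_cons,
      contribFrom_append]
    have hlen : ((colPairs j₀).length : Int) = j₀ := by
      simp [colPairs, PySem.List.length_pyRange_one]
      omega
    rw [hlen]
    have hc : pgT j₀ + j₀ = pgT (j₀ + 1) := (pgT_succ j₀ (by omega)).symm
    rw [hc, ih (j₀ + 1) n (by omega) (by omega)]
    unfold colPairs
    rw [col_gt bits u j₀ hj₀ (j₀ - 0).toNat 0 (pgT j₀) rfl (by omega) hu]
    have : pgT j₀ + (u - 0) = pgT j₀ + u := by ring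
    rw [this]
    by_cases hg : gA bits (pgT j₀ + u) = true <;> simp [hg]

-- A's bit list, indexed: bit (5 - m % 6) of data character m / 6
theorem bits_getElem (data : List Char) : ∀ (m : Nat),
    ((data.flatMap (fun ch => ([5, 4, 3, 2, 1, 0] : List Nat).map (pgABit (pgAVal ch))))[m]?)
      = if h : m / 6 < data.length then some (pgABit (pgAVal data[m / 6]) (5 - m % 6)) else none := by
  intro m
  induction data generalizing m with
  | nil => simp
  | cons ch data ih =>
    rw [List.flatMap_cons]
    by_cases hm : m < 6
    · rw [List.getElem?_append_left (by simpa using hm)]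
      have h6 : m / 6 = 0 := by omega
      have : m / 6 < (ch :: data).length := by simp [h6]
      rw [dif_pos this]
      simp only [h6, List.getElem_cons_zero]
      interval_cases m <;> rfl
    · have hm6 : 6 ≤ m := by omega
      rw [List.getElem?_append_right (by simpa using hm6)]
      have hlen : (([5, 4, 3, 2, 1, 0] : List Nat).map (pgABit (pgAVal ch))).length = 6 := rfl
      rw [hlen, ih (m - 6)]
      have hdiv : (m - 6) / 6 = m / 6 - 1 := by omega
      have hpos : 1 ≤ m / 6 := by omega
      by_cases h : m / 6 < (ch :: data).length
      · rw [dif_pos (by simp at h ⊢; omega), dif_pos h]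
        have hmod : (m - 6) % 6 = m % 6 := by omega
        have h1 : (ch :: data)[m / 6]'h = data[(m - 6) / 6]'(by simp at h; omega) := by
          have h2 : (ch :: data)[m / 6]'h = (ch :: data)[(m - 6) / 6 + 1]'(by simp at h ⊢; omega) := by
            congr 1
            omega
          rw [h2, List.getElem_cons_succ]
        rw [h1, hmod]
      · rw [dif_neg (by simp at h ⊢; omega), dif_neg h]

-- B's direct bit read agrees with A's counter bit at index T j + i
theorem bit_eq (data : List Char) (i j : Int) (hi : 0 ≤ i) (hij : i < j) :
    pgBBit data i j
      = gA (data.flatMap (fun ch => ([5, 4, 3, 2, 1, 0] : List Nat).map (pgABit (pgAVal ch))))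
          (pgT j + i) := by
  have hTj : pgT j = PySem.Int.floordiv (j * (j - 1)) 2 := rfl
  have hk0 : 0 ≤ pgT j + i := by
    have := pgT_nonneg j (by omega)
    omega
  set k : Int := pgT j + i with hk
  have hkm : k = ((k.toNat : Nat) : Int) := by omega
  set m : Nat := k.toNat with hm
  unfold pgBBit gA
  simp only [← hTj, ← hk]
  rw [PySem.List.pyGet?_of_nonneg _ hk0, bits_getElem data m]
  by_cases hguard : k < 6 * (data.length : Int)
  · have hdl : m / 6 < data.length := by omega
    rw [dif_pos hdl]
    rw [decide_eq_true hguard, Bool.true_and]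
    have hfd : (PySem.Int.floordiv k 6).toNat = m / 6 := by
      rw [hkm, PySem.Int.floordiv_eq_ediv_of_pos (by norm_num)]
      omega
    have hmd : (5 - PySem.Int.mod k 6).toNat = 5 - m % 6 := by
      rw [hkm, PySem.Int.mod_eq_emod_of_pos (by norm_num)]
      omega
    rw [hfd, hmd, List.getD_eq_getElem data '?' hdl]
    simp [pgABit, pgAVal]
  · have hdl : ¬ (m / 6 < data.length) := by omega
    rw [dif_neg hdl]
    simp [hguard]

-- a row of the all-empty initial adjacency is []
theorem getD_map_nil (l : List Int) (i : Nat) :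
    (l.map (fun _ => ([] : List Int))).getD i [] = [] := by
  induction l generalizing i with
  | nil => simp
  | cons x l ih => cases i <;> simp [*]

theorem pg_main (n : Int) (data : List Char) :
    ((PySem.List.pyRange 0 n 1).foldl (fun st j =>
        (PySem.List.pyRange 0 j 1).foldl (fun st i =>
          pgAStep (data.flatMap (fun ch => ([5, 4, 3, 2, 1, 0] : List Nat).map (pgABit (pgAVal ch)))) st (i, j)) st)
      ((PySem.List.pyRange 0 n 1).map (fun _ => ([] : List Int)), (0 : Int))).1
    = (PySem.List.pyRange 0 n 1).map (fun u =>
        (PySem.List.pyRange 0 u 1).filter (fun v => pgBBit data v u) ++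
        (PySem.List.pyRange (u + 1) n 1).filter (fun v => pgBBit data u v)) := by
  set bits := data.flatMap (fun ch => ([5, 4, 3, 2, 1, 0] : List Nat).map (pgABit (pgAVal ch))) with hbits
  set init : List (List Int) := (PySem.List.pyRange 0 n 1).map (fun _ => ([] : List Int)) with hinit
  -- flatten the nested fold into one fold over all pairs
  have hflat : (PySem.List.pyRange 0 n 1).foldl (fun st j =>
        (PySem.List.pyRange 0 j 1).foldl (fun st i => pgAStep bits st (i, j)) st) (init, 0)
      = ((PySem.List.pyRange 0 n 1).flatMap colPairs).foldl (pgAStep bits) (init, 0) := by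
    rw [List.foldl_flatMap]
    apply PySem.List.foldl_congr_mem
    intro st j _
    simp [colPairs, List.foldl_map]
  rw [hflat]
  rcases le_or_gt n 0 with hn | hn
  · rw [PySem.List.pyRange_one_eq_nil hn]
    simp [hinit, PySem.List.pyRange_one_eq_nil hn]
  -- lengths agree
  have hinitlen : init.length = n.toNat := by
    simp [hinit, PySem.List.length_pyRange_one]
  have hlenA : (((PySem.List.pyRange 0 n 1).flatMap colPairs).foldl (pgAStep bits) (init, 0)).1.length = n.toNat := by
    rw [length_foldA, hinitlen]
  apply List.ext_getElem
  · rw [hlenA, List.length_map, PySem.List.length_pyRange_one]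
    omega
  intro m hm1 hm2
  rw [hlenA] at hm1
  have hmn : (m : Int) < n := by omega
  -- B's side at index m
  have hB : ((PySem.List.pyRange 0 n 1).map (fun u =>
        (PySem.List.pyRange 0 u 1).filter (fun v => pgBBit data v u) ++
        (PySem.List.pyRange (u + 1) n 1).filter (fun v => pgBBit data u v)))[m]
      = (PySem.List.pyRange 0 (m : Int) 1).filter (fun v => pgBBit data v (m : Int)) ++
        (PySem.List.pyRange ((m : Int) + 1) n 1).filter (fun v => pgBBit data (m : Int) v) := by
    rw [List.getElem_map]
    congr 1 <;> rw [PySem.List.getElem_pyRange_one] <;> norm_num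
  rw [hB]
  -- A's side at index m, via the rows lemma
  have hgetD : (((PySem.List.pyRange 0 n 1).flatMap colPairs).foldl (pgAStep bits) (init, 0)).1[m]
      = (((PySem.List.pyRange 0 n 1).flatMap colPairs).foldl (pgAStep bits) (init, 0)).1.getD ((m : Int).toNat) [] := by
    rw [Int.toNat_natCast]
    exact (List.getD_eq_getElem _ _ (by omega)).symm
  rw [hgetD, rows_foldA bits _ init 0 (m : Int) le_rfl (by omega)
    (by
      intro p hp
      simp only [List.mem_flatMap] at hp
      obtain ⟨j, hj, hpj⟩ := hp
      rw [PySem.List.mem_pyRange_one] at hj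
      simp only [colPairs, List.mem_map] at hpj
      obtain ⟨i, hi, rfl⟩ := hpj
      rw [PySem.List.mem_pyRange_one] at hi
      refine ⟨by omega, by omega, by omega⟩)]
  rw [getD_map_nil, List.nil_append]
  -- split the pairs at column m, then take column m off the rest
  have hsplit : PySem.List.pyRange 0 n 1 = PySem.List.pyRange 0 (m : Int) 1 ++ PySem.List.pyRange (m : Int) n 1 :=
    PySem.List.pyRange_one_append 0 (m : Int) n (by omega) (by omega)
  rw [hsplit, List.flatMap_append, contribFrom_append]
  have hzero : contribFrom bits (m : Int) 0 ((PySem.List.pyRange 0 (m : Int) 1).flatMap colPairs) = [] := by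
    apply contribFrom_none
    intro p hp
    simp only [List.mem_flatMap] at hp
    obtain ⟨j, hj, hpj⟩ := hp
    rw [PySem.List.mem_pyRange_one] at hj
    simp only [colPairs, List.mem_map] at hpj
    obtain ⟨i, hi, rfl⟩ := hpj
    rw [PySem.List.mem_pyRange_one] at hi
    constructor <;> simp <;> omega
  rw [hzero, List.nil_append]
  have hclen : ((((PySem.List.pyRange 0 (m : Int) 1).flatMap colPairs)).length : Int) = pgT (m : Int) :=
    len_cols m
  rw [hclen, zero_add]
  rw [PySem.List.pyRange_one_cons (by omega : (m : Int) < n), List.flatMap_cons, contribFrom_append]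
  have hmlen : ((colPairs (m : Int)).length : Int) = (m : Int) := by
    simp [colPairs, PySem.List.length_pyRange_one]
  rw [hmlen]
  have hT : pgT (m : Int) + (m : Int) = pgT ((m : Int) + 1) := (pgT_succ (m : Int) (by omega)).symm
  rw [hT]
  congr 1
  · -- the column j = m: the lower neighbours of m
    unfold colPairs
    rw [col_eq bits (m : Int) ((m : Int) - 0).toNat 0 (pgT (m : Int)) rfl]
    apply List.filter_congr
    intro x hx
    rw [PySem.List.mem_pyRange_one] at hx
    rw [bit_eq data x (m : Int) (by omega) (by omega)]
    congr 1
    ring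
  · -- the columns j > m: the upper neighbours of m
    rw [cols_gt bits (m : Int) (by omega) ((n - ((m : Int) + 1)).toNat) ((m : Int) + 1) n rfl (by omega)]
    apply List.filter_congr
    intro x hx
    rw [PySem.List.mem_pyRange_one] at hx
    exact (bit_eq data (m : Int) x (by omega) (by omega)).symm

-- ===== VERDICT (by name: the statement is the Claim_ definition above) =====
theorem parse_graph6_spec : Claim_equal_parse_graph6 := by
  intro s _ _
  simp only [Spec_parse_graph6, parse_graph6, parse_graph6_alt]
  cases ht : PySem.Chars.strip s.toList with
  | nil => rfl
  | cons c rest =>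
    simp only [List.isEmpty_cons, Bool.false_eq_true, if_false]
    have hget0 : ((((c :: rest).getD 0 '?').toNat : Int) - 63) = pgAVal c := rfl
    rw [hget0]
    by_cases hc : pgAVal c < 63
    · simp only [pgAHeader, if_pos hc]
      exact congrArg _ (pg_main (pgAVal c) ((c :: rest).drop 1))
    · simp only [pgAHeader, if_neg hc, List.foldl_cons, List.foldl_nil]
      have hv : ∀ i : Nat, (((c :: rest).getD i '?').toNat : Int) - 63 = pgAVal ((c :: rest).getD i '?') := fun _ => rfl
      rw [hv 1, hv 2, hv 3]
      rw [show (((0 : Int) * 64 + pgAVal ((c :: rest).getD 1 '?')) * 64 + pgAVal ((c :: rest).getD 2 '?')) * 64 + pgAVal ((c :: rest).getD 3 '?')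
          = pgAVal ((c :: rest).getD 1 '?') * 4096 + pgAVal ((c :: rest).getD 2 '?') * 64 + pgAVal ((c :: rest).getD 3 '?') from by ring]
      exact congrArg _ (pg_main _ ((c :: rest).drop 4))
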